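-- pv_equiv track=rewrite | github.com/leeminHong1990/PaoDeKuai | kbengine/assets/scripts/common/utility.py | checkIsSerialTriple
-- ===== SOURCE A (Python) =====
-- def getCard2NumDict(cards):
--     card2NumDict = {}
--     for t in cards:
--         if t not in card2NumDict:
--             card2NumDict[t] = 1
--         else:
--             card2NumDict[t] += 1
--     return card2NumDict
--
-- def checkIsSerialTriple(cards, playerCardsNum):  # 三不带
--     card2NumDict = getCard2NumDict(cards)
--     # 3 * 3 以上
--     if len(card2NumDict) < 2:
--         return False
--
--     if len(cards) == playerCardsNum:
--         return False
--     # 每样3张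
--     for card in card2NumDict:
--         if card2NumDict[card] != 3:
--             return False
--     # 是否连续
--     serial = card2NumDict.keys()
--     serial = sorted(serial)
--     for i in range(len(serial) - 1):
--         if serial[i] + 1 != serial[i + 1]:
--             return False
--     return True
-- ===== SOURCE B (Python) =====
-- def checkIsSerialTriple(cards, playerCardsNum):
--     counts = {}
--     for t in cards:
--         counts[t] = counts.get(t, 0) + 1
--     if len(counts) < 2 or len(cards) == playerCardsNum:
--         return False
--     lo = hi = cards[0]
--     for card, n in counts.items():
--         if n != 3:
--             return False
--         lo = min(lo, card)
--         hi = max(hi, card)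
--     return hi - lo == len(counts) - 1
-- ===== Notes on version B (the rewrite author's own statement) =====
-- stated objective: alternative
-- what changed: The sort-then-adjacent-scan consecutiveness check is replaced by a single min/max range test over the distinct values (hi - lo == number of distinct values - 1), fused with the count==3 check into one pass over the count dict; the dict build is a get-based one-liner.
import Mathlib
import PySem

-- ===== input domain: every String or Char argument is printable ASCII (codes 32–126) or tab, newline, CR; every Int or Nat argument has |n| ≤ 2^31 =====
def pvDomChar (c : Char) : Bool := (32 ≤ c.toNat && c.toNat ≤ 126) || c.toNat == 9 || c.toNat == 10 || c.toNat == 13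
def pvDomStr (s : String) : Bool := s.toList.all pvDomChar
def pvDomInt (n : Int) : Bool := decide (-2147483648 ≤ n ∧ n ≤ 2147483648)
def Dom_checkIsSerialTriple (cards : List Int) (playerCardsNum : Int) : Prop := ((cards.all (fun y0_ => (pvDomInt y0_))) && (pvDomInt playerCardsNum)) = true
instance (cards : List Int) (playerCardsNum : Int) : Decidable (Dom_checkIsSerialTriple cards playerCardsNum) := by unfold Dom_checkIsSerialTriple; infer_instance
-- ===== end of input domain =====

-- B replaces A's sort-and-adjacent-scan consecutiveness check by a min/max range test fused
-- with the count==3 check into one pass over the count dict (alternative algorithm, same results).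

-- ===== PORT A =====
def getCard2NumDict (cards : List Int) : PySem.Dict Int Int :=
  cards.foldl
    (fun d t => if d.contains t = false then d.insert t 1 else d.modify t 0 (· + 1))
    PySem.Dict.empty

-- "for i in range(len(serial)-1): if serial[i] + 1 != serial[i+1]: return False" as the
-- obvious structural adjacent-pair recursion over the same sorted list
def serialScanA : List Int → Bool
  | a :: b :: rest => if a + 1 != b then false else serialScanA (b :: rest)
  | _ => true

def checkIsSerialTriple (cards : List Int) (playerCardsNum : Int) : Bool :=
  let card2NumDict := getCard2NumDict cards
  if card2NumDict.size < 2 then false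
  else if (cards.length : Int) == playerCardsNum then false
  else if !(card2NumDict.keys.all (fun card => card2NumDict.getD card 0 == 3)) then false
  else serialScanA (PySem.List.sorted card2NumDict.keys (fun x => x) false)

-- ===== PORT B =====
def bLoop (items : List (Int × Int)) (lo hi k : Int) : Bool :=
  match items with
  | [] => hi - lo == k - 1
  | (card, n) :: rest => if n != 3 then false else bLoop rest (min lo card) (max hi card) k

def checkIsSerialTriple_alt (cards : List Int) (playerCardsNum : Int) : Bool :=
  let counts := cards.foldl (fun d t => d.insert t (d.getD t 0 + 1)) PySem.Dict.empty
  if counts.size < 2 || (cards.length : Int) == playerCardsNum then false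
  else
    -- cards[0]; cards is nonempty on this branch (counts.size ≥ 2), so the default is never used
    let c0 := PySem.List.pyGetD cards 0 0
    bLoop counts.items c0 c0 (counts.size : Int)

-- ===== PRECONDITION & SPEC =====
def Spec_checkIsSerialTriple (cards : List Int) (playerCardsNum : Int) (out : Bool) : Prop := out = checkIsSerialTriple_alt cards playerCardsNum
instance (cards : List Int) (playerCardsNum : Int) (out : Bool) : Decidable (Spec_checkIsSerialTriple cards playerCardsNum out) := by unfold Spec_checkIsSerialTriple; infer_instance

-- ===== CLAIM (what is proved, stated in full; the proofs are below) =====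
def Claim_equal_checkIsSerialTriple : Prop := ∀ (cards : List Int) (playerCardsNum : Int), Dom_checkIsSerialTriple cards playerCardsNum → Spec_checkIsSerialTriple cards playerCardsNum (checkIsSerialTriple cards playerCardsNum)

-- ===== LEMMAS AND PROOFS =====

lemma dictStep_eq (d : PySem.Dict Int Int) (t : Int) :
    (if d.contains t = false then d.insert t 1 else d.modify t 0 (· + 1)) = d.modify t 0 (· + 1) := by
  by_cases h : d.contains t = true
  · simp [h]
  · simp only [Bool.not_eq_true] at h
    simp [h, PySem.Dict.modify, PySem.Dict.insert, PySem.Dict.getD_of_not_contains d 0 h]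

lemma getCard2NumDict_eq_counter (cards : List Int) :
    getCard2NumDict cards = PySem.Dict.counter cards := by
  rw [PySem.Dict.counter_eq_foldl]
  unfold getCard2NumDict
  congr 1
  funext d t
  exact dictStep_eq d t

lemma bLoop_map (l : List Int) (g : Int → Int) (lo hi k : Int) :
    bLoop (l.map (fun c => (c, g c))) lo hi k =
      if l.all (fun c => g c == 3) then
        ((l.foldl max hi - l.foldl min lo : Int) == k - 1)
      else false := by
  induction l generalizing lo hi with
  | nil => simp [bLoop]
  | cons c t ih =>
    by_cases h : g c = 3
    · simp [bLoop, h, ih]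
    · simp [bLoop, h]

lemma pairwise_last_ge (t : List Int) (h : Int) (hp : (h :: t).Pairwise (· < ·)) :
    h + t.length ≤ (h :: t).getLast (by simp) := by
  induction t generalizing h with
  | nil => simp
  | cons b t ih =>
    have hp' : (b :: t).Pairwise (· < ·) := (List.pairwise_cons.mp hp).2
    have hb : h < b := (List.pairwise_cons.mp hp).1 b (by simp)
    have := ih b hp'
    rw [List.getLast_cons (by simp)]
    simp only [List.length_cons]
    push_cast
    omega

lemma serialScanA_iff (t : List Int) (h : Int) (hp : (h :: t).Pairwise (· < ·)) :
    serialScanA (h :: t) = true ↔ (h :: t).getLast (by simp) = h + t.length := by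
  induction t generalizing h with
  | nil => simp [serialScanA]
  | cons b t ih =>
    have hp' : (b :: t).Pairwise (· < ·) := (List.pairwise_cons.mp hp).2
    have hb : h < b := (List.pairwise_cons.mp hp).1 b (by simp)
    have hge := pairwise_last_ge t b hp'
    rw [List.getLast_cons (by simp)]
    by_cases hbb : h + 1 = b
    · simp only [serialScanA, hbb, bne_self_eq_false, Bool.false_eq_true, if_false,
        List.length_cons, ih b hp']
      push_cast
      constructor <;> (intro hh; omega)
    · simp only [serialScanA, List.length_cons]
      rw [if_pos (by simpa using hbb)]
      push_cast
      constructor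
      · intro hh; simp at hh
      · intro hh; omega

lemma pairwise_le_getLast (s : List Int) (hs : s ≠ []) (hp : s.Pairwise (· ≤ ·)) :
    ∀ x ∈ s, x ≤ s.getLast hs := by
  induction s with
  | nil => simp
  | cons a t ih =>
    intro x hx
    cases t with
    | nil => simp at hx; simp [hx]
    | cons b u =>
      rw [List.getLast_cons (by simp)]
      rcases List.mem_cons.mp hx with rfl | hx'
      · exact le_trans ((List.pairwise_cons.mp hp).1 _ (List.getLast_mem _)) le_rfl
      · exact ih (by simp) (List.pairwise_cons.mp hp).2 x hx'

-- ===== VERDICT (by name: the statement is the Claim_ definition above) =====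
theorem checkIsSerialTriple_spec : Claim_equal_checkIsSerialTriple := by
  intro cards playerCardsNum _
  unfold Spec_checkIsSerialTriple checkIsSerialTriple checkIsSerialTriple_alt
  rw [getCard2NumDict_eq_counter, PySem.Dict.foldl_insert_getD_add_one_eq_counter]
  by_cases h1 : (PySem.Dict.counter cards).size < 2
  · simp [h1]
  · by_cases h2 : ((cards.length : Int) == playerCardsNum) = true
    · simp [h1, h2]
    · simp only [if_neg h1, if_neg h2]
      have hcond : ¬((decide ((PySem.Dict.counter cards).size < 2) || ((cards.length : Int) == playerCardsNum)) = true) := by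
        simp only [Bool.or_eq_true, decide_eq_true_eq]
        tauto
      rw [if_neg hcond]
      rw [PySem.Dict.items_counter]
      simp only [PySem.Dict.keys_counter, PySem.Dict.getD_counter]
      rw [bLoop_map]
      by_cases h3 : ((PySem.Set.ofList cards).all (fun c => ((cards.count c : Int)) == 3)) = true
      · rw [h3]
        rw [if_neg (by simp : ¬((!true) = true)), if_pos rfl]
        -- the consecutiveness core
        have hnd : (PySem.Set.ofList cards).Nodup := PySem.Set.nodup_ofList cards
        have hsz : (PySem.Dict.counter cards).size = (PySem.Set.ofList cards).length := by
          rw [← PySem.Dict.keys_counter]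
          simp [PySem.Dict.keys, PySem.Dict.size]
        cases cards with
        | nil => simp [PySem.Dict.counter, PySem.Dict.empty, PySem.Dict.size] at h1
        | cons c cs =>
          rw [PySem.List.pyGetD_zero_cons]
          have hc : c ∈ PySem.Set.ofList (c :: cs) := (PySem.Set.mem_ofList _ _).mpr (by simp)
          have hpl := PySem.List.sorted_ofList_pairwise_lt (xs := c :: cs)
          have hperm := PySem.List.sorted_perm (PySem.Set.ofList (c :: cs)) (fun x => x) false
          cases hs : PySem.List.sorted (PySem.Set.ofList (c :: cs)) (fun x => x) false with
          | nil =>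
            rw [hs] at hperm
            rw [hsz, ← hperm.length_eq] at h1
            simp at h1
          | cons h t =>
            rw [hs] at hperm hpl
            have hmemks : ∀ x, x ∈ (h :: t) → x ∈ PySem.Set.ofList (c :: cs) := fun x hx => hperm.mem_iff.mp hx
            have hhead := PySem.List.key_head_sorted_le (xs := PySem.Set.ofList (c :: cs)) (key := fun x => x) hs
            -- lo = h
            have hminle := PySem.List.foldl_min_le (PySem.Set.ofList (c :: cs)) c
            have hminmem := PySem.List.foldl_min_mem (t := PySem.Set.ofList (c :: cs)) (a := c)
            have hlo : (PySem.Set.ofList (c :: cs)).foldl min c = h := by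
              have h1' : (PySem.Set.ofList (c :: cs)).foldl min c ≤ h := hminle.2 h (hmemks h (by simp))
              have h2' : h ≤ (PySem.Set.ofList (c :: cs)).foldl min c := by
                rcases hminmem with he | hm
                · rw [he]; exact hhead c hc
                · exact hhead _ hm
              omega
            -- hi = getLast
            have hmaxle := PySem.List.le_foldl_max (PySem.Set.ofList (c :: cs)) c
            have hmaxmem := PySem.List.foldl_max_mem (t := PySem.Set.ofList (c :: cs)) (a := c)
            have hlastmem : (h :: t).getLast (by simp) ∈ PySem.Set.ofList (c :: cs) :=
              hmemks _ (List.getLast_mem _)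
            have hle := pairwise_le_getLast (h :: t) (by simp) (hpl.imp le_of_lt)
            have hhi : (PySem.Set.ofList (c :: cs)).foldl max c = (h :: t).getLast (by simp) := by
              have h1' : (h :: t).getLast (by simp) ≤ (PySem.Set.ofList (c :: cs)).foldl max c :=
                hmaxle.2 _ hlastmem
              have h2' : (PySem.Set.ofList (c :: cs)).foldl max c ≤ (h :: t).getLast (by simp) := by
                rcases hmaxmem with he | hm
                · rw [he]; exact hle c (hperm.mem_iff.mpr hc)
                · exact hle _ (hperm.mem_iff.mpr hm)
              omega
            have hk : ((PySem.Dict.counter (c :: cs)).size : Int) = (t.length : Int) + 1 := by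
              rw [hsz, ← hperm.length_eq]
              simp
            rw [hlo, hhi, hk]
            by_cases hser : serialScanA (h :: t) = true
            · have hlast := (serialScanA_iff t h hpl).mp hser
              rw [hser]
              symm
              rw [beq_iff_eq]
              omega
            · rw [Bool.not_eq_true] at hser
              have hlast : ¬((h :: t).getLast (by simp) = h + t.length) := fun hh =>
                by rw [(serialScanA_iff t h hpl).mpr hh] at hser; simp at hser
              rw [hser]
              symm
              rw [beq_eq_false_iff_ne]
              omega
      · rw [Bool.not_eq_true] at h3
        rw [h3]
        rw [if_pos (by simp : (!false) = true), if_neg (by simp : ¬(false = true))]
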